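-- pv_equiv track=rewrite | github.com/andreneco/minigrid_bt | bt.py | calculate_actions_to_move
-- ===== SOURCE A (Python) =====
-- direction_map = {(0, 1): 0, (1, 0): 1, (0, -1): 2, (-1, 0): 3}
--
-- ACTION_TO_IDX = {"turn_left": 0, "turn_right": 1, "move_forward": 2, "pick_up": 3, "drop": 4, "open": 5}
--
-- def calculate_turn_direction(current_direction, target_direction):
--     """
--     Calculates the number of turns required for the agent to face a specific direction.
--
--     Parameters:
--     - current_direction (int): The agent's current direction.
--     - target_direction (int): The desired direction to face.
--
--     Returns:
--     - int: The minimum number of turns needed to face the target direction.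
--     """
--     if current_direction is None or target_direction is None:
--         # Handle the error, for example, by returning 0 turns needed or another default value
--         return 0
--
--     # Calculate the difference in directions
--     direction_diff = current_direction - target_direction
--     # Normalize the difference within the range [0, 4)
--     normalized_diff = direction_diff % 4
--
--     return normalized_diff
--
-- def calculate_actions_to_move(start, end, current_direction):
--     """
--     Calculates the optimal sequence of actions required for an agent to navigate from a starting position
--     to a target ending position, taking into account the agent's current orientation.
--
--     This function first determines the direction the agent must face to move directly towards the target position.
--     It then calculates the minimum number of turns required to face this direction and appends the corresponding
--     turn actions to the action sequence. Once the agent is correctly oriented, a move forward action is added to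
--     the sequence to simulate movement towards the target.
--
--     Parameters:
--     - start (tuple): The starting (x, y) coordinates of the agent.
--     - end (tuple): The target (x, y) coordinates to reach.
--     - current_direction (int): The current orientation of the agent, where 0 represents up, 1 is right, 2 is down, and 3 is left.
--
--     Returns:
--     - list: A sequence of action IDs (as integers) that the agent should execute to move from start to end. This includes any necessary turns followed by a single move forward action.
--
--     Raises:
--     - ValueError: If the start or end positions are not valid tuples of two integers, or if the calculated move vector does not correspond to a valid direction in `direction_map`.
--     """
--     # Validate input coordinates
--     if not (isinstance(start, tuple) and isinstance(end, tuple) and len(start) == 2 and len(end) == 2):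
--         raise ValueError(f"Start and end must be tuples of two integers. Received start={start}, end={end}.")
--
--     actions = []
--     move_vector = (end[0] - start[0], end[1] - start[1])
--
--     # Determine the direction the agent must face to proceed directly towards the target
--     target_direction = direction_map.get(move_vector)
--     if target_direction is None:
--         raise ValueError(f"Invalid move vector {move_vector}. Cannot determine direction from start={start} to end={end}.")
--
--     # Calculate the minimal number of turns needed to face the target direction
--     turns_needed = calculate_turn_direction(current_direction, target_direction)
--
--     # Choose the most efficient turn action based on the number of turns needed
--     turn_action = "turn_left" if turns_needed <= 2 else "turn_right"
--     # Adjust turns_needed for right turn to ensure the loop below correctly interprets the action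
--     turns_needed = 1 if turn_action == "turn_right" else turns_needed
--
--     # Add the required turn actions to the sequence
--     for _ in range(abs(turns_needed)):
--         actions.append(ACTION_TO_IDX[turn_action])
--
--     # Finally, add a move forward action to simulate movement towards the target
--     actions.append(ACTION_TO_IDX["move_forward"])
--
--     return actions
-- ===== SOURCE B (Python) =====
-- direction_map = {(0, 1): 0, (1, 0): 1, (0, -1): 2, (-1, 0): 3}
--
-- TURNS_TO_ACTIONS = {0: [2], 1: [0, 2], 2: [0, 0, 2], 3: [1, 2]}
--
-- def calculate_actions_to_move(start, end, current_direction):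
--     if not (isinstance(start, tuple) and isinstance(end, tuple) and len(start) == 2 and len(end) == 2):
--         raise ValueError(f"Start and end must be tuples of two integers. Received start={start}, end={end}.")
--     move_vector = (end[0] - start[0], end[1] - start[1])
--     target_direction = direction_map.get(move_vector)
--     if target_direction is None:
--         raise ValueError(f"Invalid move vector {move_vector}. Cannot determine direction from start={start} to end={end}.")
--     normalized = 0 if current_direction is None else (current_direction - target_direction) % 4
--     return list(TURNS_TO_ACTIONS[normalized])
-- ===== Notes on version B (the rewrite author's own statement) =====
-- stated objective: simpler
-- what changed: Replaces the turn-direction helper, the left/right branch with its turns_needed adjustment and the append loop by a single precomputed table mapping the normalized direction difference (0-3) to the complete action list.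
import Mathlib
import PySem

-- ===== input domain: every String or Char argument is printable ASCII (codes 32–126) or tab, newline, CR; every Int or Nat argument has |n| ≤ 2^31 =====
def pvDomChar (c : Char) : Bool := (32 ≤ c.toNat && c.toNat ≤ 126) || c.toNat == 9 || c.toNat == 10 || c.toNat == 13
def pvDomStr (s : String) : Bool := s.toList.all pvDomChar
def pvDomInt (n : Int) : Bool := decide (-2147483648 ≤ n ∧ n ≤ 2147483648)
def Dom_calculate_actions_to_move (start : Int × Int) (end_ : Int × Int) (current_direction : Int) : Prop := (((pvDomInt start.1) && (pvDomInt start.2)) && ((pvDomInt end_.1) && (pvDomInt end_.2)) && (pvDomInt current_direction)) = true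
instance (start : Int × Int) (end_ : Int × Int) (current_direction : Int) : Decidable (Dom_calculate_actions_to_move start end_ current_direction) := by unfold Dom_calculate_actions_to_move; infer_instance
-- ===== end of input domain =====

-- B replaces the turn-direction helper, the left/right branch and the append loop of A by a
-- single precomputed table keyed by the normalized direction difference (objective: simpler).
-- Pre_ excludes inputs where the Python raises ValueError (non-adjacent cells); the Lean type
-- already rules out the non-tuple ValueError and the current_direction=None case.

-- ===== PORT A =====
-- module-level constant shared by both Pythons
def direction_map : PySem.Dict (Int × Int) Int :=
  PySem.Dict.ofList [((0, 1), 0), ((1, 0), 1), ((0, -1), 2), ((-1, 0), 3)]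

-- calculate_turn_direction with current_direction : Int (the None branch is unreachable under the type convention)
def calculate_turn_direction (current_direction : Int) (target_direction : Int) : Int :=
  PySem.Int.mod (current_direction - target_direction) 4

def calculate_actions_to_move (start : Int × Int) (end_ : Int × Int) (current_direction : Int) : List Int :=
  let move_vector : Int × Int := (end_.1 - start.1, end_.2 - start.2)
  match direction_map.get? move_vector with
  | none => []  -- Python raises ValueError here; excluded by Pre_
  | some target_direction =>
    let turns_needed := calculate_turn_direction current_direction target_direction
    let turn_action : Int := if turns_needed ≤ 2 then 0 else 1  -- ACTION_TO_IDX["turn_left"]=0, ["turn_right"]=1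
    let turns_needed := if turn_action = 1 then 1 else turns_needed
    let actions := (List.range turns_needed.natAbs).foldl (fun acc _ => acc ++ [turn_action]) []
    actions ++ [2]  -- ACTION_TO_IDX["move_forward"]=2

-- ===== PORT B =====
def TURNS_TO_ACTIONS : PySem.Dict Int (List Int) :=
  PySem.Dict.ofList [(0, [2]), (1, [0, 2]), (2, [0, 0, 2]), (3, [1, 2])]

def calculate_actions_to_move_alt (start : Int × Int) (end_ : Int × Int) (current_direction : Int) : List Int :=
  let move_vector : Int × Int := (end_.1 - start.1, end_.2 - start.2)
  match direction_map.get? move_vector with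
  | none => []  -- Python raises ValueError here; excluded by Pre_
  | some target_direction =>
    let normalized := PySem.Int.mod (current_direction - target_direction) 4
    TURNS_TO_ACTIONS.getD normalized []  -- key is always present (normalized ∈ {0,1,2,3})

-- ===== PRECONDITION & SPEC =====
-- Pre_ excludes exactly the inputs where A raises ValueError: end must be one of the four
-- grid-adjacent cells of start (otherwise the move vector has no entry in direction_map).
def Pre_calculate_actions_to_move (start : Int × Int) (end_ : Int × Int) (current_direction : Int) : Prop :=
  let dx := end_.1 - start.1
  let dy := end_.2 - start.2
  (dx = 0 ∧ dy = 1) ∨ (dx = 1 ∧ dy = 0) ∨ (dx = 0 ∧ dy = -1) ∨ (dx = -1 ∧ dy = 0)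
instance (start : Int × Int) (end_ : Int × Int) (current_direction : Int) : Decidable (Pre_calculate_actions_to_move start end_ current_direction) := by unfold Pre_calculate_actions_to_move; infer_instance
def pvWitness_calculate_actions_to_move : (Int × Int) × (Int × Int) × Int := ((0, 0), (0, 1), 3)
def Spec_calculate_actions_to_move (start : Int × Int) (end_ : Int × Int) (current_direction : Int) (out : List Int) : Prop := out = calculate_actions_to_move_alt start end_ current_direction
instance (start : Int × Int) (end_ : Int × Int) (current_direction : Int) (out : List Int) : Decidable (Spec_calculate_actions_to_move start end_ current_direction out) := by unfold Spec_calculate_actions_to_move; infer_instance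

-- ===== CLAIM (what is proved, stated in full; the proofs are below) =====
def Claim_equal_calculate_actions_to_move : Prop := ∀ (start : Int × Int) (end_ : Int × Int) (current_direction : Int), Dom_calculate_actions_to_move start end_ current_direction → Pre_calculate_actions_to_move start end_ current_direction → Spec_calculate_actions_to_move start end_ current_direction (calculate_actions_to_move start end_ current_direction)

-- ===== LEMMAS AND PROOFS =====
-- the two ways of producing the action list agree for every normalized difference m ∈ [0,4)
lemma core_eq (m : Int) (h0 : 0 ≤ m) (h4 : m < 4) :
    ((List.range (if (if m ≤ 2 then (0:Int) else 1) = 1 then (1:Int) else m).natAbs).foldl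
      (fun acc _ => acc ++ [if m ≤ 2 then (0:Int) else 1]) []) ++ [2]
    = TURNS_TO_ACTIONS.getD m [] := by
  interval_cases m <;> decide

-- both ports, after the direction_map lookup returned td, agree
lemma body_eq (c td : Int) :
    ((List.range (if (if calculate_turn_direction c td ≤ 2 then (0:Int) else 1) = 1 then (1:Int)
        else calculate_turn_direction c td).natAbs).foldl
      (fun acc _ => acc ++ [if calculate_turn_direction c td ≤ 2 then (0:Int) else 1]) []) ++ [2]
    = TURNS_TO_ACTIONS.getD (PySem.Int.mod (c - td) 4) [] := by
  have hm := PySem.Int.mod_eq_emod_of_pos (a := c - td) (b := 4) (by norm_num)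
  unfold calculate_turn_direction
  exact core_eq _ (by rw [hm]; omega) (by rw [hm]; omega)

-- ===== VERDICT (by name: the statement is the Claim_ definition above) =====
theorem calculate_actions_to_move_spec : Claim_equal_calculate_actions_to_move := by
  intro start end_ c _ hpre
  obtain ⟨s1, s2⟩ := start
  obtain ⟨e1, e2⟩ := end_
  simp only [Spec_calculate_actions_to_move, calculate_actions_to_move,
    calculate_actions_to_move_alt]
  rcases hpre with ⟨h1, h2⟩ | ⟨h1, h2⟩ | ⟨h1, h2⟩ | ⟨h1, h2⟩ <;> simp only at h1 h2 <;>
    rw [h1, h2]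
  · exact body_eq c 0
  · exact body_eq c 1
  · exact body_eq c 2
  · exact body_eq c 3
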